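-- pv_equiv track=rewrite | github.com/Shivani11422/CSL0501_PhishingUrlDetection_ShivaniShrivastav | app.py | is_trusted
-- ===== SOURCE A (Python) =====
-- def is_trusted(domain):
--     trusted = [
--         "google.com", "accounts.google.com",
--         "amazon.in", "facebook.com",
--         "youtube.com", "youtu.be",
--         "paytm.com", "instagram.com"
--     ]
--
--     for t in trusted:
--         if domain == t or domain.endswith("." + t):
--             return True
--     return False
-- ===== SOURCE B (Python) =====
-- _TRUSTED = {
--     "google.com", "accounts.google.com",
--     "amazon.in", "facebook.com",
--     "youtube.com", "youtu.be",
--     "paytm.com", "instagram.com",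
-- }
--
--
-- def is_trusted(domain):
--     parts = domain.split(".")
--     for i in range(len(parts)):
--         if ".".join(parts[i:]) in _TRUSTED:
--             return True
--     return False
-- ===== Notes on version B (the rewrite author's own statement) =====
-- stated objective: idiomatic
-- what changed: Instead of scanning the trusted list with == / endswith per entry, B splits the domain at dots and checks each dot-boundary suffix (including the whole domain) for membership in a set of the eight trusted names.
import Mathlib
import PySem

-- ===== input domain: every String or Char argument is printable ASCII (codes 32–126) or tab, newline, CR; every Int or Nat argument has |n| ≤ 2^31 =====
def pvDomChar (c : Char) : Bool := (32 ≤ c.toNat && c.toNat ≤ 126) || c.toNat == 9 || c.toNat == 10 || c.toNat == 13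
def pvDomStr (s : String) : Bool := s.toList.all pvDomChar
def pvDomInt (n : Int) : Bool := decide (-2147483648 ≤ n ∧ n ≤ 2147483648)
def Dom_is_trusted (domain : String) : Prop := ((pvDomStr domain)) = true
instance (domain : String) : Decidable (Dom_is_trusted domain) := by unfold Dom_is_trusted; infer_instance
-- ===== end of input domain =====

-- B replaces A's scan of the trusted list (==/endswith per entry) by iterating over the
-- domain's dot-boundary suffixes and testing each for membership in a set of trusted names (idiomatic).


-- ===== PORT A =====
def pvTrustedA : List String :=
  ["google.com", "accounts.google.com",
   "amazon.in", "facebook.com",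
   "youtube.com", "youtu.be",
   "paytm.com", "instagram.com"]

-- the for-loop returning True on the first hit, False after the loop, is List.any
def is_trusted (domain : String) : Bool :=
  pvTrustedA.any (fun t => domain == t || PySem.Str.endswith domain ("." ++ t))

-- ===== PORT B =====
def pvTrustedSet : PySem.Set String :=
  PySem.Set.ofList
    ["google.com", "accounts.google.com",
     "amazon.in", "facebook.com",
     "youtube.com", "youtu.be",
     "paytm.com", "instagram.com"]

-- the separator "." is non-empty, so Python's split never raises: split? is always `some` (getD's default is unreachable)
def is_trusted_alt (domain : String) : Bool :=
  let parts := (PySem.Str.split? domain ".").getD []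
  (PySem.List.pyRange 0 parts.length).any (fun i =>
    pvTrustedSet.contains (PySem.Str.join "." (PySem.List.slice parts (some i) none)))

-- ===== PRECONDITION & SPEC =====
def Spec_is_trusted (domain : String) (out : Bool) : Prop := out = is_trusted_alt domain
instance (domain : String) (out : Bool) : Decidable (Spec_is_trusted domain out) := by unfold Spec_is_trusted; infer_instance

-- ===== CLAIM (what is proved, stated in full; the proofs are below) =====
def Claim_equal_is_trusted : Prop := ∀ (domain : String), Dom_is_trusted domain → Spec_is_trusted domain (is_trusted domain)

-- ===== LEMMAS AND PROOFS =====

-- PySem's fuel-based splitOn agrees with Mathlib's List.splitOn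
theorem pv_splitOn_go_eq (fuel : Nat) (l cur : List Char) (acc : List (List Char)) (h : l.length < fuel) :
    PySem.Chars.splitOn.go ['.'] fuel l cur acc
      = acc.reverse ++ (List.splitOn '.' l).modifyHead (fun p => cur.reverse ++ p) := by
  induction fuel generalizing l cur acc with
  | zero => omega
  | succ n ih =>
    cases l with
    | nil =>
      simp [PySem.Chars.splitOn.go, List.splitOn_nil]
    | cons c rest =>
      by_cases hc : c = '.'
      · subst hc
        rw [PySem.Chars.splitOn.go.eq_def]
        simp only [List.isPrefixOf, beq_self_eq_true, Bool.true_and, if_pos]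
        rw [ih _ _ _ (by simp at h ⊢; omega)]
        obtain ⟨a, as, hsp⟩ := List.exists_cons_of_ne_nil (List.splitOnP_ne_nil (fun x => x == '.') rest)
        simp [List.splitOn, List.splitOnP_cons, hsp]
      · rw [PySem.Chars.splitOn.go.eq_def]
        simp only [List.isPrefixOf]
        rw [if_neg (by simp; exact fun e => hc e.symm)]
        rw [ih _ _ _ (by simp at h ⊢; omega)]
        obtain ⟨a, as, hsp⟩ := List.exists_cons_of_ne_nil (List.splitOnP_ne_nil (fun x => x == '.') rest)
        simp [List.splitOn, List.splitOnP_cons, hsp, hc]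

theorem pv_chars_splitOn_eq (l : List Char) :
    PySem.Chars.splitOn l ['.'] = List.splitOn '.' l := by
  rw [PySem.Chars.splitOn, pv_splitOn_go_eq (l.length + 1) l [] [] (by omega)]
  obtain ⟨a, as, hsp⟩ := List.exists_cons_of_ne_nil (List.splitOnP_ne_nil (fun x => x == '.') l)
  simp [List.splitOn] at hsp ⊢
  simp [hsp]

theorem pv_inter_cons {α : Type} (x : α) (a : List α) (bs : List (List α)) (hb : bs ≠ []) :
    [x].intercalate (a :: bs) = a ++ x :: [x].intercalate bs := by
  obtain ⟨b, bs', rfl⟩ := List.exists_cons_of_ne_nil hb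
  simp [List.intercalate, List.intersperse_cons₂]

theorem pv_inter_append {α : Type} (x : α) (as bs : List (List α)) (ha : as ≠ []) (hb : bs ≠ []) :
    [x].intercalate (as ++ bs) = [x].intercalate as ++ x :: [x].intercalate bs := by
  induction as with
  | nil => exact absurd rfl ha
  | cons a as ih =>
    cases as with
    | nil => rw [List.singleton_append, pv_inter_cons x a bs hb]; simp [List.intercalate]
    | cons a' as' =>
      rw [List.cons_append, pv_inter_cons x a ((a' :: as') ++ bs) (by simp),
          ih (by simp), pv_inter_cons x a (a' :: as') (by simp)]
      simp

theorem pv_splitOn_append (pre t : List Char) :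
    List.splitOn '.' (pre ++ '.' :: t) = List.splitOn '.' pre ++ List.splitOn '.' t := by
  induction pre with
  | nil => simp [List.splitOn, List.splitOnP_cons]
  | cons c pre ih =>
    by_cases hc : c = '.'
    · subst hc
      simp only [List.cons_append, List.splitOn, List.splitOnP_cons, beq_self_eq_true, if_pos]
      simp [List.splitOn] at ih
      simp [ih]
    · obtain ⟨a, as, hsp⟩ := List.exists_cons_of_ne_nil (List.splitOnP_ne_nil (fun x => x == '.') pre)
      simp only [List.cons_append, List.splitOn, List.splitOnP_cons, beq_iff_eq, if_neg hc] at ih ⊢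
      simp [ih, hsp]

-- the dot-boundary-suffix characterisation: some suffix of the split equals t
-- iff the whole string is t or the string ends with '.' followed by t
theorem pv_suffix_iff (L t : List Char) :
    (∃ i, i < (List.splitOn '.' L).length ∧ ['.'].intercalate ((List.splitOn '.' L).drop i) = t)
      ↔ (L = t ∨ ('.' :: t) <:+ L) := by
  constructor
  · rintro ⟨i, hi, rfl⟩
    cases i with
    | zero =>
      left
      rw [List.drop_zero, List.intercalate_splitOn]
    | succ j =>
      right
      refine ⟨['.'].intercalate ((List.splitOn '.' L).take (j + 1)), ?_⟩
      have hL := List.intercalate_splitOn L '.'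
      conv_rhs => rw [← hL]
      conv_rhs => rw [← List.take_append_drop (j + 1) (List.splitOn '.' L)]
      rw [pv_inter_append '.' _ _ ?_ ?_]
      · simp [List.splitOn]
        exact List.splitOnP_ne_nil _ L
      · intro hnil
        have := congrArg List.length hnil
        simp at this
        omega
  · rintro (rfl | ⟨pre, hpre⟩)
    · refine ⟨0, ?_, ?_⟩
      · have := List.splitOnP_ne_nil (fun x => x == '.') L
        simp [List.splitOn]
        exact List.length_pos_of_ne_nil this
      · rw [List.drop_zero, List.intercalate_splitOn]
    · subst hpre
      refine ⟨(List.splitOn '.' pre).length, ?_, ?_⟩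
      · rw [pv_splitOn_append]
        have := List.splitOnP_ne_nil (fun x => x == '.') t
        have ht : 0 < (List.splitOn '.' t).length := List.length_pos_of_ne_nil this
        simp
        omega
      · rw [pv_splitOn_append, List.drop_left, List.intercalate_splitOn]

theorem pv_A_iff (domain : String) :
    is_trusted domain = true
      ↔ ∃ t ∈ pvTrustedA, (domain.toList = t.toList ∨ ('.' :: t.toList) <:+ domain.toList) := by
  rw [is_trusted, List.any_eq_true]
  refine exists_congr fun t => and_congr_right fun _ => ?_
  rw [Bool.or_eq_true, beq_iff_eq, PySem.Str.endswith_eq, PySem.Chars.endswith_iff]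
  have hdot : ("." ++ t).toList = '.' :: t.toList := by
    rw [String.toList_append]; rfl
  rw [hdot, ← String.toList_inj]

theorem pv_pyRange_zero (n : Nat) :
    PySem.List.pyRange 0 n = (List.range n).map (fun k : Nat => (k : Int)) := by
  cases n with
  | zero => simp [PySem.List.pyRange]
  | succ m =>
    have h1 : (0:Int) < ((m+1 : Nat) : Int) := by positivity
    simp only [PySem.List.pyRange, if_neg (by norm_num : ¬(1:Int) = 0),
      if_pos (by norm_num : (0:Int) < 1), if_pos h1]
    have h2 : (((((m+1 : Nat)) : Int) - 0 + 1 - 1) / 1).toNat = m + 1 := by simp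
    rw [h2]
    refine List.map_congr_left fun k _ => ?_
    omega

theorem pv_any_pyRange (n : Nat) (f : Int → Bool) :
    (PySem.List.pyRange 0 n).any f = (List.range n).any (fun k => f k) := by
  rw [pv_pyRange_zero, List.any_map]
  rfl

theorem pv_join_toList (parts : List String) (j : Nat) (L : List Char)
    (hptl : parts.map String.toList = List.splitOn '.' L) :
    (PySem.Str.join "." (parts.drop j)).toList = ['.'].intercalate ((List.splitOn '.' L).drop j) := by
  rw [PySem.Str.toList_join, show (".").toList = ['.'] from rfl, PySem.Chars.join,
    List.map_drop, hptl]

theorem pv_B_iff (domain : String) :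
    is_trusted_alt domain = true
      ↔ ∃ j, j < (List.splitOn '.' domain.toList).length ∧
          ∃ t ∈ pvTrustedA, ['.'].intercalate ((List.splitOn '.' domain.toList).drop j) = t.toList := by
  have hmap := PySem.Str.split?_map domain "."
  rw [show (".").toList = ['.'] from rfl, PySem.Chars.split?] at hmap
  simp only [List.isEmpty_cons, if_false, Bool.false_eq_true, pv_chars_splitOn_eq] at hmap
  obtain ⟨parts, hparts, hptl⟩ : ∃ parts, PySem.Str.split? domain "." = some parts ∧
      parts.map String.toList = List.splitOn '.' domain.toList := by
    cases h : PySem.Str.split? domain "." with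
    | none => rw [h] at hmap; simp at hmap
    | some ps => rw [h] at hmap; simp at hmap; exact ⟨ps, rfl, hmap⟩
  have hlen : parts.length = (List.splitOn '.' domain.toList).length := by
    rw [← hptl, List.length_map]
  rw [is_trusted_alt]
  simp only [hparts, Option.getD_some]
  rw [pv_any_pyRange]
  simp only [List.any_eq_true, List.mem_range]
  rw [← hlen]
  refine ⟨fun ⟨j, hj, hc⟩ => ⟨j, hj, ?_⟩, fun ⟨j, hj, hq⟩ => ⟨j, hj, ?_⟩⟩
  · rw [PySem.List.slice_from _ (Int.natCast_nonneg j), Int.toNat_natCast,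
      PySem.Set.contains_iff, pvTrustedSet, PySem.Set.mem_ofList] at hc
    refine ⟨PySem.Str.join "." (parts.drop j), hc, ?_⟩
    exact (pv_join_toList parts j domain.toList hptl).symm
  · obtain ⟨t, ht, heq⟩ := hq
    rw [PySem.List.slice_from _ (Int.natCast_nonneg j), Int.toNat_natCast,
      PySem.Set.contains_iff, pvTrustedSet, PySem.Set.mem_ofList]
    have h3 : (PySem.Str.join "." (parts.drop j)).toList = t.toList := by
      rw [pv_join_toList parts j domain.toList hptl, heq]
    rw [String.toList_inj] at h3
    rw [h3]
    exact ht

-- ===== VERDICT (by name: the statement is the Claim_ definition above) =====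
theorem is_trusted_spec : Claim_equal_is_trusted := by
  intro domain _
  unfold Spec_is_trusted
  rw [Bool.eq_iff_iff, pv_A_iff, pv_B_iff]
  constructor
  · rintro ⟨t, ht, hcase⟩
    obtain ⟨i, hi, heq⟩ := (pv_suffix_iff domain.toList t.toList).mpr hcase
    exact ⟨i, hi, t, ht, heq⟩
  · rintro ⟨j, hj, t, ht, heq⟩
    exact ⟨t, ht, (pv_suffix_iff domain.toList t.toList).mp ⟨j, hj, heq⟩⟩
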